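-- pv_equiv track=rewrite | github.com/AsadAnalyst/Urdu-to-Roman-Urdu | src/utils.py | sequence_to_text
-- ===== SOURCE A (Python) =====
-- from typing import Dict, List, Tuple, Any
--
-- def sequence_to_text(sequence: List[int], idx2word: Dict[int, str],
--                     remove_special: bool = True) -> str:
--     """Convert sequence of indices back to text"""
--     words = []
--     for idx in sequence:
--         word = idx2word.get(idx, '<UNK>')
--         if remove_special and word in ['<PAD>', '<SOS>', '<EOS>']:
--             if word == '<EOS>':
--                 break
--             continue
--         words.append(word)
--
--     # Join based on tokenization type (if characters, join without spaces)
--     if len(words) > 0 and len(words[0]) == 1:  # Character-level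
--         return ''.join(words)
--     else:  # Word-level
--         return ' '.join(words)
-- ===== SOURCE B (Python) =====
-- def sequence_to_text(sequence, idx2word, remove_special=True):
--     """Convert sequence of indices back to text"""
--     words = [idx2word.get(i, '<UNK>') for i in sequence]
--     if remove_special:
--         if '<EOS>' in words:
--             words = words[:words.index('<EOS>')]
--         words = [w for w in words if w not in ('<PAD>', '<SOS>')]
--     sep = '' if words and len(words[0]) == 1 else ' '
--     return sep.join(words)
-- ===== Notes on version B (the rewrite author's own statement) =====
-- stated objective: simpler
-- what changed: Replaces A's single stateful loop (skip/continue/break per element) with a pipeline: map all indices to words, truncate at the first <EOS>, filter out <PAD>/<SOS>, then join.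
import Mathlib
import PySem

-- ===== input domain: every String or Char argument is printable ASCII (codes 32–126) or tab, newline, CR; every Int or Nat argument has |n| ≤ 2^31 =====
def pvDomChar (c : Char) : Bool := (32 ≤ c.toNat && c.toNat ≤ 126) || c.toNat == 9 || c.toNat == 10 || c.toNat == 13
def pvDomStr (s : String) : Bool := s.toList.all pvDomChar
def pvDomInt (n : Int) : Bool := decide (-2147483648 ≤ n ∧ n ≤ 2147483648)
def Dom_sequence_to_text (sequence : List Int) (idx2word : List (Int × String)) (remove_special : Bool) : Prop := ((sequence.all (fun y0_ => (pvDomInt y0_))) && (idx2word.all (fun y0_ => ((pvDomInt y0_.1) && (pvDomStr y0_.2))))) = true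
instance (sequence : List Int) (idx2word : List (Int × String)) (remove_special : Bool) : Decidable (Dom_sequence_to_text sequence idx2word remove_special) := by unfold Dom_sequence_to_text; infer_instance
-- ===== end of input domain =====

-- B replaces A's stateful skip/continue/break loop by a map → truncate-at-<EOS> → filter pipeline (simpler decomposition, same cost).


-- ===== PORT A =====
-- A's for-loop with continue/break, as structural recursion over the sequence.
def pvWordsA (sequence : List Int) (idx2word : List (Int × String)) (remove_special : Bool) : List String :=
  match sequence with
  | [] => []
  | i :: rest =>
    let word := PySem.Dict.getD ⟨idx2word⟩ i "<UNK>"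
    if remove_special && (word == "<PAD>" || word == "<SOS>" || word == "<EOS>") then
      if word == "<EOS>" then []
      else pvWordsA rest idx2word remove_special
    else word :: pvWordsA rest idx2word remove_special

def sequence_to_text (sequence : List Int) (idx2word : List (Int × String)) (remove_special : Bool) : String :=
  let words := pvWordsA sequence idx2word remove_special
  if words.length > 0 && PySem.Str.len (words.headD "") == 1 then
    PySem.Str.join "" words
  else
    PySem.Str.join " " words

-- ===== PORT B =====
def sequence_to_text_alt (sequence : List Int) (idx2word : List (Int × String)) (remove_special : Bool) : String :=
  let wordsAll := sequence.map (fun i => PySem.Dict.getD ⟨idx2word⟩ i "<UNK>")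
  let words :=
    if remove_special then
      let truncated :=
        match PySem.List.index? wordsAll "<EOS>" with   -- '<EOS>' in words / words.index('<EOS>')
        | some k => PySem.List.slice wordsAll none (some (k : Int))
        | none => wordsAll
      truncated.filter (fun w => !(w == "<PAD>" || w == "<SOS>"))
    else wordsAll
  let sep := if words.length > 0 && PySem.Str.len (words.headD "") == 1 then "" else " "
  PySem.Str.join sep words

-- ===== PRECONDITION & SPEC =====
def Spec_sequence_to_text (sequence : List Int) (idx2word : List (Int × String)) (remove_special : Bool) (out : String) : Prop := out = sequence_to_text_alt sequence idx2word remove_special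
instance (sequence : List Int) (idx2word : List (Int × String)) (remove_special : Bool) (out : String) : Decidable (Spec_sequence_to_text sequence idx2word remove_special out) := by unfold Spec_sequence_to_text; infer_instance

-- ===== CLAIM (what is proved, stated in full; the proofs are below) =====
def Claim_equal_sequence_to_text : Prop := ∀ (sequence : List Int) (idx2word : List (Int × String)) (remove_special : Bool), Dom_sequence_to_text sequence idx2word remove_special → Spec_sequence_to_text sequence idx2word remove_special (sequence_to_text sequence idx2word remove_special)

-- ===== LEMMAS AND PROOFS =====

-- B's truncate-before-first-<EOS> (index? + slice) is takeWhile (≠ <EOS>).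
theorem pv_trunc_eq_takeWhile (ws : List String) :
    (match PySem.List.index? ws "<EOS>" with
      | some k => PySem.List.slice ws none (some (k : Int))
      | none => ws)
    = ws.takeWhile (fun w => !(w == "<EOS>")) := by
  induction ws with
  | nil => simp [PySem.List.index?]
  | cons w rest ih =>
    by_cases hw : w = "<EOS>"
    · subst hw
      simp only [PySem.List.index?_cons_self, PySem.List.slice_to_natCast]
      simp
    · rw [PySem.List.index?_cons_of_ne rest hw]
      cases hrest : PySem.List.index? rest "<EOS>" with
      | none =>
        rw [hrest] at ih; simp only at ih
        simp [hw, ← ih]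
      | some k =>
        rw [hrest] at ih; simp only [PySem.List.slice_to_natCast] at ih
        simp only [Option.map_some]
        rw [PySem.List.slice_to_natCast]
        simp [hw, List.take_succ_cons, ih]

-- A's loop result when remove_special is true: filter ∘ takeWhile over the mapped words.
theorem pvWordsA_true (sequence : List Int) (idx2word : List (Int × String)) :
    pvWordsA sequence idx2word true
    = ((sequence.map (fun i => PySem.Dict.getD ⟨idx2word⟩ i "<UNK>")).takeWhile
        (fun w => !(w == "<EOS>"))).filter (fun w => !(w == "<PAD>" || w == "<SOS>")) := by
  induction sequence with
  | nil => simp [pvWordsA]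
  | cons i rest ih =>
    simp only [pvWordsA, List.map_cons]
    by_cases hE : PySem.Dict.getD ⟨idx2word⟩ i "<UNK>" = "<EOS>"
    · simp [hE]
    · by_cases hP : PySem.Dict.getD ⟨idx2word⟩ i "<UNK>" = "<PAD>"
      · simp [hP, ih]
      · by_cases hS : PySem.Dict.getD ⟨idx2word⟩ i "<UNK>" = "<SOS>"
        · simp [hS, ih]
        · simp [hE, hP, hS, ih]

-- A's loop result when remove_special is false: just the mapped words.
theorem pvWordsA_false (sequence : List Int) (idx2word : List (Int × String)) :
    pvWordsA sequence idx2word false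
    = sequence.map (fun i => PySem.Dict.getD ⟨idx2word⟩ i "<UNK>") := by
  induction sequence with
  | nil => simp [pvWordsA]
  | cons i rest ih => simp [pvWordsA, ih]

-- A's word list equals B's word list, for either flag.
theorem pv_words_eq (sequence : List Int) (idx2word : List (Int × String)) (remove_special : Bool) :
    pvWordsA sequence idx2word remove_special
    = (if remove_special then
        ((match PySem.List.index? (sequence.map (fun i => PySem.Dict.getD ⟨idx2word⟩ i "<UNK>")) "<EOS>" with
          | some k => PySem.List.slice (sequence.map (fun i => PySem.Dict.getD ⟨idx2word⟩ i "<UNK>")) none (some (k : Int))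
          | none => sequence.map (fun i => PySem.Dict.getD ⟨idx2word⟩ i "<UNK>")).filter
            (fun w => !(w == "<PAD>" || w == "<SOS>")))
      else sequence.map (fun i => PySem.Dict.getD ⟨idx2word⟩ i "<UNK>")) := by
  cases remove_special with
  | false => simp [pvWordsA_false]
  | true => rw [pv_trunc_eq_takeWhile]; simp [pvWordsA_true]

-- A's branch-on-the-join equals B's branch-on-the-separator.
theorem pv_join_if (ws : List String) :
    (if ws.length > 0 && PySem.Str.len (ws.headD "") == 1 then
      PySem.Str.join "" ws else PySem.Str.join " " ws)
    = PySem.Str.join (if ws.length > 0 && PySem.Str.len (ws.headD "") == 1 then "" else " ") ws := by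
  cases h : (ws.length > 0 && PySem.Str.len (ws.headD "") == 1) <;> simp

-- ===== VERDICT (by name: the statement is the Claim_ definition above) =====
theorem sequence_to_text_spec : Claim_equal_sequence_to_text := by
  intro sequence idx2word remove_special _
  unfold Spec_sequence_to_text
  simp only [sequence_to_text, sequence_to_text_alt]
  rw [pv_words_eq, pv_join_if]
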